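-- pv_equiv track=rewrite | github.com/Livia-Zaharia/HOMEWORK | week-2023-03-13/ubbi_dubbi.py | ubbi_dubbi_translate
-- ===== SOURCE A (Python) =====
-- def ubbi_dubbi_translate(word:str)->str:
--     vowels="aeiou"
--     word.lower()
--     position=[]
--
--
--     for letter_v in vowels:
--         if letter_v in word:
--             for no,letter in enumerate(word):
--                 if letter_v==letter:
--                     position.append(no)
--
--     position.sort()
--
--     prev_index=0
--     new_word=""
--     for index_value in position:
--         new_word=new_word+word[prev_index:index_value]+"ub"
--         prev_index=index_value
--
--     new_word+=word[prev_index:]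
--
--     return new_word
-- ===== SOURCE B (Python) =====
-- def ubbi_dubbi_translate(word: str) -> str:
--     return "".join("ub" + c if c in "aeiou" else c for c in word)
-- ===== Notes on version B (the rewrite author's own statement) =====
-- stated objective: faster
-- what changed: Replaced the per-vowel index collection, sort and slice-based reconstruction (with repeated string concatenation) by a single left-to-right pass that emits the expanded text for each character and joins once.
import Mathlib
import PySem

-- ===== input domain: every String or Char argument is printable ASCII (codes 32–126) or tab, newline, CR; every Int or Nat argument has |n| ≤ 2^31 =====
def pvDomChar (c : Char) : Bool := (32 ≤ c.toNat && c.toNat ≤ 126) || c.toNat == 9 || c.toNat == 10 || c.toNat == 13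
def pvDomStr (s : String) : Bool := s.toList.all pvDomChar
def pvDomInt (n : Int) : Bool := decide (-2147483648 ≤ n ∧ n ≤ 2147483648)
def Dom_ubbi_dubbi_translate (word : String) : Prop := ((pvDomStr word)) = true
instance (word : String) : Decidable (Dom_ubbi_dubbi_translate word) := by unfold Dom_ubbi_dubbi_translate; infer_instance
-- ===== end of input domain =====

-- B replaces A's vowel-position list + sort + slice reconstruction by one direct pass (simpler).

-- ===== PORT A =====
-- Literal port of A; the Python's `word.lower()` result is discarded, so it is omitted here too.
def ubbi_dubbi_translate (word : String) : String :=
  let w := word.toList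
  let position : List Int :=
    ("aeiou".toList).foldl (fun pos letter_v =>
      if PySem.Chars.isIn [letter_v] w then
        (PySem.List.enumerate w 0).foldl
          (fun pos2 p => if letter_v == p.2 then pos2 ++ [p.1] else pos2) pos
      else pos) []
  let position2 := PySem.List.sorted position (fun x => x) false
  let st := position2.foldl
    (fun (s : List Char × Int) index_value =>
      (s.1 ++ PySem.List.slice w (some s.2) (some index_value) ++ ['u', 'b'], index_value))
    ([], 0)
  String.ofList (st.1 ++ PySem.List.slice w (some st.2) none)

-- ===== PORT B =====
def ubbi_dubbi_translate_alt (word : String) : String :=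
  String.ofList (word.toList.flatMap (fun c => if c ∈ "aeiou".toList then ['u', 'b', c] else [c]))

-- ===== PRECONDITION & SPEC =====
def Spec_ubbi_dubbi_translate (word : String) (out : String) : Prop := out = ubbi_dubbi_translate_alt word
instance (word : String) (out : String) : Decidable (Spec_ubbi_dubbi_translate word out) := by unfold Spec_ubbi_dubbi_translate; infer_instance

-- ===== CLAIM (what is proved, stated in full; the proofs are below) =====
def Claim_equal_ubbi_dubbi_translate : Prop := ∀ (word : String), Dom_ubbi_dubbi_translate word → Spec_ubbi_dubbi_translate word (ubbi_dubbi_translate word)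

-- ===== LEMMAS AND PROOFS =====

-- vowel indices of a list, front to back
def vIdx : List Char → List Nat
  | [] => []
  | c :: l => if c ∈ "aeiou".toList then 0 :: (vIdx l).map (· + 1) else (vIdx l).map (· + 1)

-- A's reconstruction loop, on Nat indices
def reconAux (l : List Char) (acc : List Char) (prev : Nat) : List Nat → List Char
  | [] => acc ++ l.drop prev
  | i :: is => reconAux l (acc ++ (l.drop prev).take (i - prev) ++ ['u', 'b']) i is

-- B's body as a list function
def insUb (l : List Char) : List Char :=
  l.flatMap (fun c => if c ∈ "aeiou".toList then ['u', 'b', c] else [c])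

lemma perm_filter_or {α : Type} (e : List α) (p q : α → Bool)
    (h : ∀ x, ¬(p x = true ∧ q x = true)) :
    (e.filter p ++ e.filter q).Perm (e.filter (fun x => p x || q x)) := by
  induction e with
  | nil => simp
  | cons a e ih =>
    by_cases hp : p a = true
    · have hq : q a = false := by
        cases hq : q a
        · rfl
        · exact absurd ⟨hp, hq⟩ (h a)
      simpa [hp, hq] using ih.cons a
    · simp only [Bool.not_eq_true] at hp
      cases hq : q a with
      | false => simpa [hp, hq] using ih
      | true =>
        simp only [List.filter_cons, hp, hq, Bool.false_or]
        exact (List.perm_middle.trans (ih.cons a))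

lemma flatMap_filter_perm (vs : List Char) (hvs : vs.Nodup) (e : List (Int × Char)) :
    (vs.flatMap (fun v => e.filter (fun p => v == p.2))).Perm
      (e.filter (fun p => decide (p.2 ∈ vs))) := by
  induction vs with
  | nil => simp
  | cons v vs ih =>
    simp only [List.flatMap_cons]
    have hnd := List.nodup_cons.mp hvs
    have h1 : (e.filter (fun p => v == p.2) ++
        e.filter (fun p => decide (p.2 ∈ vs))).Perm
        (e.filter (fun p => (v == p.2) || decide (p.2 ∈ vs))) := by
      apply perm_filter_or
      rintro x ⟨hx1, hx2⟩
      simp only [beq_iff_eq] at hx1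
      simp only [decide_eq_true_eq] at hx2
      exact hnd.1 (hx1 ▸ hx2)
    have h2 : (e.filter (fun p => (v == p.2) || decide (p.2 ∈ vs))) =
        e.filter (fun p => decide (p.2 ∈ v :: vs)) := by
      apply List.filter_congr
      intro x _
      by_cases h : v = x.2
      · subst h; simp
      · simp [h, Ne.symm h]
    exact ((List.Perm.append_left _ (ih hnd.2)).trans h1).trans (h2 ▸ .rfl)

-- A's inner appending loop over enumerate, per vowel
lemma inner_fold_eq (w : List Char) (v : Char) (pos : List Int) :
    (PySem.List.enumerate w 0).foldl
      (fun pos2 p => if v == p.2 then pos2 ++ [p.1] else pos2) pos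
    = pos ++ ((PySem.List.enumerate w 0).filter (fun p => v == p.2)).map (·.1) := by
  exact PySem.List.foldl_append_if _ _ _ _

lemma filter_eq_nil_of_not_isIn (w : List Char) (v : Char)
    (h : PySem.Chars.isIn [v] w = false) :
    (PySem.List.enumerate w 0).filter (fun p => v == p.2) = [] := by
  have hv : v ∉ w := by
    intro hm
    obtain ⟨s1, t1, rfl⟩ := List.append_of_mem hm
    have : PySem.Chars.isIn [v] (s1 ++ v :: t1) = true := by
      rw [PySem.Chars.isIn_iff_infix]
      exact ⟨s1, t1, by simp⟩
    simp [this] at h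
  apply List.filter_eq_nil_iff.mpr
  intro p hp
  rcases (PySem.List.mem_enumerate_iff _ _ _).mp hp with ⟨k, hk, rfl⟩
  simp only [beq_iff_eq]
  intro hvp
  exact hv (hvp ▸ (List.getElem_mem hk))

-- the whole positions-building loop, guard removed
lemma positions_eq (w : List Char) :
    ("aeiou".toList).foldl (fun pos letter_v =>
      if PySem.Chars.isIn [letter_v] w then
        (PySem.List.enumerate w 0).foldl
          (fun pos2 p => if letter_v == p.2 then pos2 ++ [p.1] else pos2) pos
      else pos) []
    = ("aeiou".toList).flatMap
        (fun v => ((PySem.List.enumerate w 0).filter (fun p => v == p.2)).map (·.1)) := by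
  have hstep : ∀ (acc : List Int) (v : Char),
      (if PySem.Chars.isIn [v] w then
        (PySem.List.enumerate w 0).foldl
          (fun pos2 p => if v == p.2 then pos2 ++ [p.1] else pos2) acc
      else acc)
      = acc ++ ((PySem.List.enumerate w 0).filter (fun p => v == p.2)).map (·.1) := by
    intro acc v
    by_cases h : PySem.Chars.isIn [v] w = true
    · rw [if_pos h]
      exact inner_fold_eq w v acc
    · rw [if_neg h]
      rw [filter_eq_nil_of_not_isIn w v (by simpa using h)]
      simp
  calc ("aeiou".toList).foldl _ []
      = ("aeiou".toList).foldl (fun pos v =>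
          pos ++ ((PySem.List.enumerate w 0).filter (fun p => v == p.2)).map (·.1)) [] := by
        apply PySem.List.foldl_congr_mem
        intro acc v _
        exact hstep acc v
    _ = _ := by
        simpa using PySem.List.foldl_append_eq_flatMap
          (fun v => ((PySem.List.enumerate w 0).filter (fun p => v == p.2)).map (·.1))
          ("aeiou".toList) []

-- enumerate-filter-map = vIdx, shifted by the start
lemma enum_filter_eq_vIdx (l : List Char) (s : Int) :
    ((PySem.List.enumerate l s).filter (fun p => decide (p.2 ∈ "aeiou".toList))).map (·.1)
    = (vIdx l).map (fun (n : Nat) => s + (n : Int)) := by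
  induction l generalizing s with
  | nil => simp [vIdx]
  | cons c l ih =>
    rw [PySem.List.enumerate_cons, List.filter_cons]
    by_cases hc : c ∈ "aeiou".toList
    · rw [vIdx, if_pos hc]
      simp only [hc, decide_true, if_true, List.map_cons, ih, List.map_map]
      congr 1
      · simp
      · apply List.map_congr_left
        intro n _
        simp [Function.comp]
        ring
    · rw [vIdx, if_neg hc]
      simp only [hc, decide_false, Bool.false_eq_true, if_false, ih, List.map_map]
      apply List.map_congr_left
      intro n _
      simp [Function.comp]
      ring

lemma vI_pairwise (w : List Char) :
    (((PySem.List.enumerate w 0).filter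
        (fun p => decide (p.2 ∈ "aeiou".toList))).map (·.1)).Pairwise (· < ·) := by
  apply List.Pairwise.map
  · exact fun a b h => h
  · exact (PySem.List.pairwise_lt_enumerate w 0).filter _

-- sorted(position) is exactly the increasing list of vowel indices
lemma sorted_positions (w : List Char) :
    PySem.List.sorted
      (("aeiou".toList).flatMap
        (fun v => ((PySem.List.enumerate w 0).filter (fun p => v == p.2)).map (·.1)))
      (fun x => x) false
    = ((PySem.List.enumerate w 0).filter (fun p => decide (p.2 ∈ "aeiou".toList))).map (·.1) := by
  apply PySem.List.sorted_eq_of_perm_of_pairwise_lt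
  · have h := (flatMap_filter_perm ("aeiou".toList) (by decide) (PySem.List.enumerate w 0)).map (·.1)
    refine h.symm.trans ?_
    rw [List.map_flatMap]
  · exact vI_pairwise w

-- A's reconstruction fold is reconAux over the Nat index list
lemma fold_eq_reconAux (l : List Char) (is : List Nat) (acc : List Char) (prev : Nat) :
    (let st := (is.map (fun (n : Nat) => (n : Int))).foldl
      (fun (s : List Char × Int) i =>
        (s.1 ++ PySem.List.slice l (some s.2) (some i) ++ ['u', 'b'], i)) (acc, (prev : Int));
     st.1 ++ PySem.List.slice l (some st.2) none)
    = reconAux l acc prev is := by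
  induction is generalizing acc prev with
  | nil => simp [reconAux, PySem.List.slice_from_natCast]
  | cons i is ih =>
    simp only [List.map_cons, List.foldl_cons, reconAux]
    rw [PySem.List.slice_natCast]
    exact ih _ i

lemma insUb_of_vIdx_nil (m : List Char) (hm : vIdx m = []) : insUb m = m := by
  induction m with
  | nil => simp [insUb]
  | cons d m ihm =>
    by_cases hd : d ∈ "aeiou".toList
    · rw [vIdx, if_pos hd] at hm; simp at hm
    · rw [vIdx, if_neg hd] at hm
      simp only [List.map_eq_nil_iff] at hm
      simp only [insUb, List.flatMap_cons, if_neg hd] at ihm ⊢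
      rw [ihm hm]
      simp

-- shifting reconAux under a cons'd head, for positive prev
lemma reconAux_shift (is : List Nat) (l : List Char) (c : Char) (acc : List Char) (prev : Nat)
    (h : 1 ≤ prev) :
    reconAux (c :: l) acc prev (is.map (· + 1)) = reconAux l acc (prev - 1) is := by
  induction is generalizing acc prev with
  | nil =>
    simp only [reconAux, List.map_nil]
    congr 1
    obtain ⟨p, rfl⟩ := Nat.exists_eq_add_of_le h
    simp [Nat.add_comm 1 p, List.drop_succ_cons]
  | cons i is ih =>
    simp only [reconAux, List.map_cons]
    obtain ⟨p, rfl⟩ := Nat.exists_eq_add_of_le h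
    have hdrop : (c :: l).drop (1 + p) = l.drop p := by
      simp [Nat.add_comm 1 p, List.drop_succ_cons]
    have hsub : i + 1 - (1 + p) = i - p := by omega
    have hp : 1 + p - 1 = p := by omega
    rw [hdrop, hsub, hp]
    have := ih (acc ++ (l.drop p).take (i - p) ++ ['u', 'b']) (i + 1) (by omega)
    simpa using this

-- reconAux over the vowel indices is the one-pass insertion
lemma reconAux_vIdx (l : List Char) (acc : List Char) :
    reconAux l acc 0 (vIdx l) = acc ++ insUb l := by
  induction l generalizing acc with
  | nil => simp [vIdx, reconAux, insUb]
  | cons c l ih =>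
    by_cases hc : c ∈ "aeiou".toList
    · rw [vIdx, if_pos hc]
      cases hv : vIdx l with
      | nil =>
        simp only [List.map_nil, reconAux, List.drop_zero, Nat.sub_zero, List.take_zero,
          List.append_nil]
        rw [insUb, List.flatMap_cons, if_pos hc, ← insUb, insUb_of_vIdx_nil l hv]
        simp
      | cons i is =>
        simp only [List.map_cons, reconAux, List.drop_zero, Nat.sub_zero, List.take_zero,
          List.append_nil]
        rw [reconAux_shift is l c _ (i + 1) (by omega)]
        simp only [Nat.add_sub_cancel]
        have hIH := ih (acc ++ ['u', 'b', c])
        rw [hv] at hIH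
        simp only [reconAux, List.drop_zero, Nat.sub_zero] at hIH
        have heq : acc ++ ['u', 'b'] ++ (c :: l).take (i + 1) ++ ['u', 'b']
            = acc ++ ['u', 'b', c] ++ List.take i l ++ ['u', 'b'] := by
          simp [List.take_succ_cons]
        rw [heq, hIH]
        simp only [insUb, List.flatMap_cons]
        rw [if_pos hc]
        simp
    · rw [vIdx, if_neg hc]
      cases hv : vIdx l with
      | nil =>
        simp only [List.map_nil, reconAux, List.drop_zero]
        rw [insUb, List.flatMap_cons, if_neg hc, ← insUb, insUb_of_vIdx_nil l hv]
        simp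
      | cons i is =>
        simp only [List.map_cons, reconAux, List.drop_zero, Nat.sub_zero]
        rw [reconAux_shift is l c _ (i + 1) (by omega)]
        simp only [Nat.add_sub_cancel]
        have hIH := ih (acc ++ [c])
        rw [hv] at hIH
        simp only [reconAux, List.drop_zero, Nat.sub_zero] at hIH
        have heq : acc ++ (c :: l).take (i + 1) ++ ['u', 'b']
            = acc ++ [c] ++ List.take i l ++ ['u', 'b'] := by
          simp [List.take_succ_cons]
        rw [heq, hIH]
        simp only [insUb, List.flatMap_cons]
        rw [if_neg hc]
        simp

-- ===== VERDICT (by name: the statement is the Claim_ definition above) =====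
theorem ubbi_dubbi_translate_spec : Claim_equal_ubbi_dubbi_translate := by
  intro word _
  unfold Spec_ubbi_dubbi_translate
  simp only [ubbi_dubbi_translate, ubbi_dubbi_translate_alt]
  rw [positions_eq, sorted_positions, enum_filter_eq_vIdx]
  have hmap : (vIdx word.toList).map (fun (n : Nat) => (0 : Int) + (n : Int))
      = (vIdx word.toList).map (fun (n : Nat) => (n : Int)) := by
    apply List.map_congr_left; intro n _; ring
  rw [hmap]
  have h0 := fold_eq_reconAux word.toList (vIdx word.toList) [] 0
  simp only [Nat.cast_zero] at h0
  rw [h0, reconAux_vIdx]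
  rfl
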